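-- pv_equiv track=rewrite | github.com/dmossberg/python-segments-scheduler | segment_scheduler/scheduler_multiprocess.py | __split_list_in_chunks
-- ===== SOURCE A (Python) =====
-- import itertools
--
-- MIN_CHUNK_SIZE = 1000
--
-- def __split_list_in_chunks(
--         sorted_list: list,
--         max_num_chunks: int,
--         min_chunk_size: int = MIN_CHUNK_SIZE):
--     """
--         Split a list into chunks.
--
--         Args:
--             sorted_list (list): A list of sorted elements
--             max_num_chunks (int): The maximum number of chunks
--             min_chunk_size (int): The minimum size of a chunk
--
--         Returns:
--             list: A list of chunks
--
--         Raises: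
--             TypeError: If the sorted_list argument is not a list
--             TypeError: If the max_num_chunks argument is not an integer
--             TypeError: If the min_chunk_size argument is not an integer
--             ValueError: If the max_num_chunks argument is less than 1
--             ValueError: If the min_chunk_size argument is less than 1
--     """
--     chunk_size = len(sorted_list) // max_num_chunks
--
--     while chunk_size < min_chunk_size and max_num_chunks > 1:
--         max_num_chunks -= 1
--         chunk_size = len(sorted_list) // max_num_chunks
--
--     remaining_elements = len(sorted_list) % max_num_chunks
--     chunks = []
--     slicer_index = 0
--
--     for i in range(max_num_chunks):
--         iteration_chunk_size = chunk_size
--         if remaining_elements > 0: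
--             iteration_chunk_size += 1
--             remaining_elements -= 1
--
--         chunks.append(list(itertools.islice(
--             sorted_list,
--             slicer_index,
--             slicer_index + iteration_chunk_size)))
--
--         slicer_index += iteration_chunk_size
--
--     return chunks
-- ===== SOURCE B (Python) =====
-- def __split_list_in_chunks(sorted_list, max_num_chunks, min_chunk_size=1000):
--     n = len(sorted_list)
--     k = max_num_chunks
--     if k > 1 and n // k < min_chunk_size:
--         # closed form of the shrinking loop: largest k' <= k with n // k' >= min_chunk_size, at least 1
--         k = max(1, n // min_chunk_size)
--     q, r = divmod(n, k)
--     return [sorted_list[i * q + min(i, r):(i + 1) * q + min(i + 1, r)]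
--             for i in range(k)]
-- ===== Notes on version B (the rewrite author's own statement) =====
-- stated objective: faster
-- what changed: Replaces the decrement-until-fits while loop and the stateful remainder-carrying append loop by a closed-form chunk count max(1, n // min_chunk_size) and a direct index-arithmetic slice per chunk.
import Mathlib
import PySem

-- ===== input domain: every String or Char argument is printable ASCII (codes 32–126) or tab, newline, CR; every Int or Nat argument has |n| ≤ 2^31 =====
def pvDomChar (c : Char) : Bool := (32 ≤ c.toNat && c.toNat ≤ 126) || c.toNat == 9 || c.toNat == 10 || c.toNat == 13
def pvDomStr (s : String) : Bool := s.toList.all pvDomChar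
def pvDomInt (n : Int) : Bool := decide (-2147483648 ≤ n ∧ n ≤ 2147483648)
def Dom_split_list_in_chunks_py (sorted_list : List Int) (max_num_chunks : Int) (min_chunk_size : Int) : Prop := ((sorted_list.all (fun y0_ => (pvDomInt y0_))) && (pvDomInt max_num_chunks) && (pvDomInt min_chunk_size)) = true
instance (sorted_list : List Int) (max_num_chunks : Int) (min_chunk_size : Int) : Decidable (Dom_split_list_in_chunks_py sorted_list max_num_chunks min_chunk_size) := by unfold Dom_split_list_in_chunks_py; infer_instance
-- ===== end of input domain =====

-- B replaces A's decrement-until-fits while loop and remainder-carrying append loop by a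
-- closed-form chunk count and direct per-chunk index arithmetic (objective: faster).

-- ===== PORT A =====
-- the 'while chunk_size < min_chunk_size and max_num_chunks > 1' loop (returns the final max_num_chunks)
def whileA (n : Int) (m : Int) (mcs : Int) : Int :=
  if PySem.Int.floordiv n m < mcs ∧ 1 < m then whileA n (m - 1) mcs else m
termination_by (m - 1).toNat
decreasing_by omega

-- the 'for i in range(max_num_chunks)' loop; i is unused so it runs max_num_chunks.toNat times;
-- islice(xs, a, a+c) = PySem.List.slice xs a (a+c): exact here since in all reachable states a, c ≥ 0
def buildA (xs : List Int) (q : Int) : Nat → Int → Int → List (List Int)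
  | 0, _, _ => []
  | Nat.succ cnt, rem, idx =>
      let c := if rem > 0 then q + 1 else q
      let rem' := if rem > 0 then rem - 1 else rem
      PySem.List.slice xs (some idx) (some (idx + c)) :: buildA xs q cnt rem' (idx + c)

def split_list_in_chunks_py (sorted_list : List Int) (max_num_chunks : Int) (min_chunk_size : Int) : List (List Int) :=
  let n : Int := sorted_list.length
  let m := whileA n max_num_chunks min_chunk_size
  let chunk_size := PySem.Int.floordiv n m
  let remaining := PySem.Int.mod n m
  buildA sorted_list chunk_size m.toNat remaining 0

-- ===== PORT B =====
def split_list_in_chunks_py_alt (sorted_list : List Int) (max_num_chunks : Int) (min_chunk_size : Int) : List (List Int) :=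
  let n : Int := sorted_list.length
  let k := if 1 < max_num_chunks ∧ PySem.Int.floordiv n max_num_chunks < min_chunk_size
           then max 1 (PySem.Int.floordiv n min_chunk_size) else max_num_chunks
  let q := PySem.Int.floordiv n k
  let r := PySem.Int.mod n k
  (PySem.List.pyRange 0 k 1).map
    (fun i => PySem.List.slice sorted_list (some (i * q + min i r)) (some ((i + 1) * q + min (i + 1) r)))

-- ===== PRECONDITION & SPEC =====
-- Pre_ excludes exactly max_num_chunks = 0, where the Python A raises ZeroDivisionError
def Pre_split_list_in_chunks_py (sorted_list : List Int) (max_num_chunks : Int) (min_chunk_size : Int) : Prop :=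
  max_num_chunks ≠ 0
instance (sorted_list : List Int) (max_num_chunks : Int) (min_chunk_size : Int) : Decidable (Pre_split_list_in_chunks_py sorted_list max_num_chunks min_chunk_size) := by unfold Pre_split_list_in_chunks_py; infer_instance
def pvWitness_split_list_in_chunks_py : List Int × Int × Int := ([1, 2, 3, 4, 5], 2, 2)

def Spec_split_list_in_chunks_py (sorted_list : List Int) (max_num_chunks : Int) (min_chunk_size : Int) (out : List (List Int)) : Prop := out = split_list_in_chunks_py_alt sorted_list max_num_chunks min_chunk_size
instance (sorted_list : List Int) (max_num_chunks : Int) (min_chunk_size : Int) (out : List (List Int)) : Decidable (Spec_split_list_in_chunks_py sorted_list max_num_chunks min_chunk_size out) := by unfold Spec_split_list_in_chunks_py; infer_instance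

-- ===== CLAIM (what is proved, stated in full; the proofs are below) =====
def Claim_equal_split_list_in_chunks_py : Prop := ∀ (sorted_list : List Int) (max_num_chunks : Int) (min_chunk_size : Int), Dom_split_list_in_chunks_py sorted_list max_num_chunks min_chunk_size → Pre_split_list_in_chunks_py sorted_list max_num_chunks min_chunk_size → Spec_split_list_in_chunks_py sorted_list max_num_chunks min_chunk_size (split_list_in_chunks_py sorted_list max_num_chunks min_chunk_size)

-- ===== LEMMAS AND PROOFS =====

theorem whileA_guard_false (n m mcs : Int) (h : ¬ (PySem.Int.floordiv n m < mcs ∧ 1 < m)) :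
    whileA n m mcs = m := by
  rw [whileA]; simp [h]

-- the while loop computes the closed form whenever its guard fires
theorem whileA_closed (n : Int) (hn : 0 ≤ n) (mcs : Int) :
    ∀ m : Int, 1 ≤ m → PySem.Int.floordiv n m < mcs →
      whileA n m mcs = max 1 (PySem.Int.floordiv n mcs) := by
  intro m hm
  induction hk : (m - 1).toNat using Nat.strong_induction_on generalizing m with
  | _ k ih =>
    intro hlt
    have hmcs : 0 < mcs := by
      have h0 : 0 ≤ PySem.Int.floordiv n m := by
        rw [PySem.Int.floordiv_eq_ediv_of_pos (by omega)]
        exact Int.ediv_nonneg hn (by omega)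
      omega
    by_cases h1 : 1 < m
    · rw [whileA, if_pos ⟨hlt, h1⟩]
      by_cases h2 : PySem.Int.floordiv n (m - 1) < mcs
      · exact ih (m - 1 - 1).toNat (by omega) (m - 1) (by omega) rfl h2
      · rw [whileA_guard_false _ _ _ (by simp [h2])]
        have hub : n < m * mcs := by
          have := (PySem.Int.floordiv_lt_iff_lt_mul (a := n) (b := m) (q := mcs) (by omega)).mp hlt
          linarith [this, mul_comm mcs m]
        have hlb : mcs * (m - 1) ≤ n :=
          (PySem.Int.le_floordiv_iff_mul_le (a := n) (b := m - 1) (q := mcs) (by omega)).mp (by omega)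
        have hf : PySem.Int.floordiv n mcs = m - 1 := by
          rw [PySem.Int.floordiv_eq_iff_of_pos (by omega)]
          constructor
          · linarith [mul_comm (m - 1) mcs]
          · linarith [mul_comm m mcs]
        rw [hf]; omega
    · have hm1 : m = 1 := by omega
      rw [whileA_guard_false _ _ _ (by simp; omega)]
      subst hm1
      have hn1 : n < mcs := by
        have : PySem.Int.floordiv n 1 = n := by
          rw [PySem.Int.floordiv_eq_ediv_of_pos (by omega)]; simp
        omega
      have hf : PySem.Int.floordiv n mcs = 0 := by
        rw [PySem.Int.floordiv_eq_iff_of_pos (by omega)]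
        constructor <;> omega
      rw [hf]; omega

theorem buildA_eq (xs : List Int) (q r : Int) (hq : 0 ≤ q) (hr : 0 ≤ r) :
    ∀ (cnt t : Nat),
      buildA xs q cnt (r - min (t : Int) r) ((t : Int) * q + min (t : Int) r) =
        (List.range cnt).map (fun j =>
          PySem.List.slice xs (some (((t + j : Nat) : Int) * q + min ((t + j : Nat) : Int) r))
            (some ((((t + j : Nat) : Int) + 1) * q + min (((t + j : Nat) : Int) + 1) r))) := by
  intro cnt
  induction cnt with
  | zero => intro t; simp [buildA]
  | succ c ih =>
    intro t
    rw [buildA, List.range_succ_eq_map, List.map_cons, List.map_map]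
    by_cases ht : (t : Int) < r
    · have h1 : min (t : Int) r = t := by omega
      have h2 : min ((t : Int) + 1) r = (t : Int) + 1 := by omega
      rw [if_pos (by omega), if_pos (by omega)]
      congr 1
      · simp only [Nat.add_zero, h1, h2]; ring_nf
      · have e1 : r - min (t : Int) r - 1 = r - min ((t + 1 : Nat) : Int) r := by
          push_cast; omega
        have e2 : (t : Int) * q + min (t : Int) r + (q + 1)
            = ((t + 1 : Nat) : Int) * q + min ((t + 1 : Nat) : Int) r := by
          push_cast [h1]
          have : min ((t : Int) + 1) r = (t : Int) + 1 := h2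
          rw [this]; ring
        rw [e1, e2, ih (t + 1)]
        apply List.map_congr_left
        intro j _
        have e3 : t + 1 + j = t + Nat.succ j := by omega
        rw [e3]; rfl
    · have h1 : min (t : Int) r = r := by omega
      have h2 : min ((t : Int) + 1) r = r := by omega
      rw [if_neg (by omega), if_neg (by omega)]
      congr 1
      · simp only [Nat.add_zero, h1, h2]; ring_nf
      · have e1 : r - min (t : Int) r = r - min ((t + 1 : Nat) : Int) r := by
          push_cast; omega
        have e2 : (t : Int) * q + min (t : Int) r + q
            = ((t + 1 : Nat) : Int) * q + min ((t + 1 : Nat) : Int) r := by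
          push_cast [h1, h2]; ring
        rw [e1, e2, ih (t + 1)]
        apply List.map_congr_left
        intro j _
        have e3 : t + 1 + j = t + Nat.succ j := by omega
        rw [e3]; rfl

-- ===== VERDICT (by name: the statement is the Claim_ definition above) =====
theorem split_list_in_chunks_py_spec : Claim_equal_split_list_in_chunks_py := by
  unfold Claim_equal_split_list_in_chunks_py
  intro xs m mcs _ _
  unfold Spec_split_list_in_chunks_py split_list_in_chunks_py split_list_in_chunks_py_alt
  simp only []
  have hn0 : (0 : Int) ≤ (xs.length : Int) := Int.natCast_nonneg _
  have hk : (if 1 < m ∧ PySem.Int.floordiv (xs.length : Int) m < mcs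
      then max 1 (PySem.Int.floordiv (xs.length : Int) mcs) else m)
      = whileA (xs.length : Int) m mcs := by
    by_cases h : 1 < m ∧ PySem.Int.floordiv (xs.length : Int) m < mcs
    · rw [if_pos h, whileA_closed (xs.length : Int) hn0 mcs m (by omega) h.2]
    · rw [if_neg h, whileA_guard_false _ _ _ (by tauto)]
  rw [hk]
  set k := whileA (xs.length : Int) m mcs with hkdef
  rw [PySem.List.pyRange_one, List.map_map]
  by_cases hk1 : 0 < k
  case neg =>
    have hk0 : k ≤ 0 := by omega
    have h1 : k.toNat = 0 := by omega
    have h2 : (k - 0).toNat = 0 := by omega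
    rw [h1, h2]; simp [buildA]
  case pos =>
    have hq : 0 ≤ PySem.Int.floordiv (xs.length : Int) k := by
      rw [PySem.Int.floordiv_eq_ediv_of_pos hk1]
      exact Int.ediv_nonneg hn0 (by omega)
    have hr : 0 ≤ PySem.Int.mod (xs.length : Int) k := PySem.Int.mod_nonneg _ hk1
    have := buildA_eq xs (PySem.Int.floordiv (xs.length : Int) k)
      (PySem.Int.mod (xs.length : Int) k) hq hr k.toNat 0
    simp only [Nat.cast_zero] at this
    rw [min_eq_left hr] at this
    simp only [sub_zero, zero_mul, zero_add] at this ⊢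
    rw [this]
    simp [Function.comp]
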